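-- pv_equiv track=rewrite | github.com/bluesealin/ExcelDiffer | diffAlgorithm.py | calcSubsequenceIndex
-- ===== SOURCE A (Python) =====
-- def calcSubsequenceIndex(path, a, b, aIndex, bIndex):
--     """
--     递归方式计算公共子序列的下标值
--     :param path: 路径信息dp二维数组
--     :param a: 序列a
--     :param b: 序列b
--     :param aIndex: 当前所求序列a的下标值
--     :param bIndex: 当前所求序列b的下标值
--     :return: 对应两个公共子序列的下标值数组
--     """
--     if aIndex == 0 or bIndex == 0:
--         return [], []
--     if path[aIndex][bIndex] == 1:
--         s1, s2 = calcSubsequenceIndex(path, a, b, aIndex - 1, bIndex - 1)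
--         s1.append(aIndex - 1)
--         s2.append(bIndex - 1)
--         return s1, s2
--     elif path[aIndex][bIndex] == -1:
--         return calcSubsequenceIndex(path, a, b, aIndex, bIndex - 1)
--     else:
--         return calcSubsequenceIndex(path, a, b, aIndex - 1, bIndex)
-- ===== SOURCE B (Python) =====
-- def _matchedPairs(path, i, j):
--     """Walk the path matrix once, collecting matched (i-1, j-1) pairs in the
--     order visited (descending)."""
--     pairs = []
--     while i != 0 and j != 0:
--         d = path[i][j]
--         if d == 1:
--             pairs.append((i - 1, j - 1))
--             i -= 1
--             j -= 1
--         elif d == -1: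
--             j -= 1
--         else:
--             i -= 1
--     return pairs
--
--
-- def calcSubsequenceIndex(path, a, b, aIndex, bIndex):
--     pairs = _matchedPairs(path, aIndex, bIndex)
--     pairs.reverse()
--     return [p[0] for p in pairs], [p[1] for p in pairs]
-- ===== Notes on version B (the rewrite author's own statement) =====
-- stated objective: alternative
-- what changed: Replaces A's non-tail recursion returning a pair of lists (appending on the way back up) by an iterative walk that builds ONE list of matched (i,j) pairs high-to-low, then reverses it once and unzips it into the two index lists.
-- outside the precondition, e.g. on calcSubsequenceIndex([[0, 1], [0, 1]], [], [], -1, 1): A returns ([-2], [0]), B returns ([-2], [0])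
import Mathlib
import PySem

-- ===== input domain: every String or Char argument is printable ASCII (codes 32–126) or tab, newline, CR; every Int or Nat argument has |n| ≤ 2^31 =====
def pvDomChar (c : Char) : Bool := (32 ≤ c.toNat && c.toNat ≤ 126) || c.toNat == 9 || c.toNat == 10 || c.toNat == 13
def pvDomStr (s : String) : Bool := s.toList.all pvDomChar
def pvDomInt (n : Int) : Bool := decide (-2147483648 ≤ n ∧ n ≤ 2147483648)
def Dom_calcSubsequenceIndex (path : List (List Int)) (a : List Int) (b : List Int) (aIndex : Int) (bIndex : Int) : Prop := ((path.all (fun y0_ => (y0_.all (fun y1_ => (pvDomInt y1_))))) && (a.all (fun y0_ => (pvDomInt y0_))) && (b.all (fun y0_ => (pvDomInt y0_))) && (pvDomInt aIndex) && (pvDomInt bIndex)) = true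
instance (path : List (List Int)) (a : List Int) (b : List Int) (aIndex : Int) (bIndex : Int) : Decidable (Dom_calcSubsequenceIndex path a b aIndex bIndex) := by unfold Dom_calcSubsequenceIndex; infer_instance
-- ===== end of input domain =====

-- B replaces A's non-tail recursion on a pair of lists by an iterative walk building one list of matched pairs, reversed and unzipped at the end; return values agree on Pre_.


-- ===== PORT A =====
-- Literal transliteration of A's recursion; the fuel parameter only makes the
-- recursion total in Lean (on Pre_ it never runs out), and the `none` branches
-- of pyGet? are where the Python raises IndexError (excluded by Pre_).
def calcSubsequenceIndexA (fuel : Nat) (path : List (List Int)) (a : List Int) (b : List Int) (aIndex : Int) (bIndex : Int) : List Int × List Int :=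
  match fuel with
  | 0 => ([], [])
  | fuel + 1 =>
    if aIndex = 0 ∨ bIndex = 0 then ([], [])
    else
      match PySem.List.pyGet? path aIndex with
      | none => ([], [])  -- Python: IndexError
      | some row =>
        match PySem.List.pyGet? row bIndex with
        | none => ([], [])  -- Python: IndexError
        | some v =>
          if v = 1 then
            let s := calcSubsequenceIndexA fuel path a b (aIndex - 1) (bIndex - 1)
            (s.1 ++ [aIndex - 1], s.2 ++ [bIndex - 1])
          else if v = -1 then
            calcSubsequenceIndexA fuel path a b aIndex (bIndex - 1)
          else
            calcSubsequenceIndexA fuel path (a) b (aIndex - 1) bIndex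

def calcSubsequenceIndex (path : List (List Int)) (a : List Int) (b : List Int) (aIndex : Int) (bIndex : Int) : List Int × List Int :=
  calcSubsequenceIndexA (aIndex.toNat + bIndex.toNat + 1) path a b aIndex bIndex

-- ===== PORT B =====
-- Transliteration of B's `_matchedPairs` while-loop: one accumulator list of
-- (i-1, j-1) pairs, appended in visit order (fuel only for totality in Lean).
def matchedPairsB (fuel : Nat) (path : List (List Int)) (i : Int) (j : Int) (pairs : List (Int × Int)) : List (Int × Int) :=
  match fuel with
  | 0 => pairs
  | fuel + 1 =>
    if i ≠ 0 ∧ j ≠ 0 then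
      match PySem.List.pyGet? path i with
      | none => pairs  -- Python: IndexError
      | some row =>
        match PySem.List.pyGet? row j with
        | none => pairs  -- Python: IndexError
        | some d =>
          if d = 1 then
            matchedPairsB fuel path (i - 1) (j - 1) (pairs ++ [(i - 1, j - 1)])
          else if d = -1 then
            matchedPairsB fuel path i (j - 1) pairs
          else
            matchedPairsB fuel path (i - 1) j pairs
    else pairs

def calcSubsequenceIndex_alt (path : List (List Int)) (a : List Int) (b : List Int) (aIndex : Int) (bIndex : Int) : List Int × List Int :=
  let pairs := (matchedPairsB (aIndex.toNat + bIndex.toNat + 1) path aIndex bIndex []).reverse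
  (pairs.map Prod.fst, pairs.map Prod.snd)

-- ===== PRECONDITION & SPEC =====
-- Pre_ excludes negative or out-of-range indices, on which the Python A either
-- raises IndexError or returns a value only via Python's accidental
-- negative-index wraparound (B behaves identically there in Python; the Lean
-- ports are only claimed on Pre_). Rows with index 1..aIndex are the ones the
-- backtrack can visit, so only they need to be long enough.
def Pre_calcSubsequenceIndex (path : List (List Int)) (a : List Int) (b : List Int) (aIndex : Int) (bIndex : Int) : Prop :=
  aIndex = 0 ∨ bIndex = 0 ∨
    (0 < aIndex ∧ 0 < bIndex ∧ aIndex < (path.length : Int) ∧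
      ∀ i ∈ List.range (aIndex.toNat + 1), 0 < i → bIndex < ((path.getD i []).length : Int))
instance (path : List (List Int)) (a : List Int) (b : List Int) (aIndex : Int) (bIndex : Int) : Decidable (Pre_calcSubsequenceIndex path a b aIndex bIndex) := by unfold Pre_calcSubsequenceIndex; infer_instance

def pvWitness_calcSubsequenceIndex : List (List Int) × List Int × List Int × Int × Int :=
  ([[0, 0, 0], [0, -1, 1], [0, 1, -1]], [5, 6], [7, 5], 2, 2)

def Spec_calcSubsequenceIndex (path : List (List Int)) (a : List Int) (b : List Int) (aIndex : Int) (bIndex : Int) (out : List Int × List Int) : Prop := out = calcSubsequenceIndex_alt path a b aIndex bIndex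
instance (path : List (List Int)) (a : List Int) (b : List Int) (aIndex : Int) (bIndex : Int) (out : List Int × List Int) : Decidable (Spec_calcSubsequenceIndex path a b aIndex bIndex out) := by unfold Spec_calcSubsequenceIndex; infer_instance

-- ===== CLAIM (what is proved, stated in full; the proofs are below) =====
def Claim_equal_calcSubsequenceIndex : Prop := ∀ (path : List (List Int)) (a : List Int) (b : List Int) (aIndex : Int) (bIndex : Int), Dom_calcSubsequenceIndex path a b aIndex bIndex → Pre_calcSubsequenceIndex path a b aIndex bIndex → Spec_calcSubsequenceIndex path a b aIndex bIndex (calcSubsequenceIndex path a b aIndex bIndex)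

-- ===== LEMMAS AND PROOFS =====

-- Accumulator generalization: the loop only ever appends to `pairs`.
lemma matchedPairsB_acc (fuel : Nat) :
    ∀ (path : List (List Int)) (i j : Int) (acc : List (Int × Int)),
      matchedPairsB fuel path i j acc = acc ++ matchedPairsB fuel path i j [] := by
  induction fuel with
  | zero => intro path i j acc; simp [matchedPairsB]
  | succ n ih =>
    intro path i j acc
    simp only [matchedPairsB]
    split
    · cases hrow : PySem.List.pyGet? path i with
      | none => simp
      | some row =>
        cases hv : PySem.List.pyGet? row j with
        | none => simp [hv]
        | some d =>
          simp only [hv, List.nil_append]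
          by_cases h1 : d = 1
          · simp only [h1, if_true]
            rw [ih path (i-1) (j-1) (acc ++ [(i-1, j-1)]),
                ih path (i-1) (j-1) [(i-1, j-1)]]
            simp
          · by_cases h2 : d = -1
            · simp only [if_neg h1, h2, if_true]; exact ih path i (j-1) acc
            · simp only [if_neg h1, if_neg h2]; exact ih path (i-1) j acc
    · simp

-- A's recursion result is B's (descending) pair list, reversed and unzipped.
lemma recA_eq_pairs (fuel : Nat) :
    ∀ (path : List (List Int)) (a b : List Int) (aI bI : Int),
      0 ≤ aI → 0 ≤ bI → aI < (path.length : Int) →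
      (∀ i ∈ List.range (aI.toNat + 1), 0 < i → bI < ((path.getD i []).length : Int)) →
      aI.toNat + bI.toNat < fuel →
      calcSubsequenceIndexA fuel path a b aI bI =
        ((matchedPairsB fuel path aI bI []).reverse.map Prod.fst,
         (matchedPairsB fuel path aI bI []).reverse.map Prod.snd) := by
  induction fuel with
  | zero => intro _ _ _ _ _ _ _ _ _ hf; omega
  | succ n ih =>
    intro path a b aI bI ha hb halen hrows hf
    by_cases hbase : aI = 0 ∨ bI = 0
    · have : ¬ (aI ≠ 0 ∧ bI ≠ 0) := by tauto
      simp [calcSubsequenceIndexA, matchedPairsB, hbase, this]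
    · push_neg at hbase
      obtain ⟨ha0, hb0⟩ := hbase
      have haI : (0 : Int) < aI := lt_of_le_of_ne ha (Ne.symm ha0)
      have hbI : (0 : Int) < bI := lt_of_le_of_ne hb (Ne.symm hb0)
      have hrow : PySem.List.pyGet? path aI = some (path.getD aI.toNat []) := by
        have hlt : aI.toNat < path.length := by omega
        rw [PySem.List.pyGet?_of_nonneg path ha, List.getElem?_eq_getElem hlt,
          List.getD_eq_getElem _ _ hlt]
      have hblen : bI < ((path.getD aI.toNat []).length : Int) := by
        apply hrows aI.toNat (by simp) (by omega)
      have hval : PySem.List.pyGet? (path.getD aI.toNat []) bI =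
          some ((path.getD aI.toNat []).getD bI.toNat 0) := by
        have hlt : bI.toNat < (path.getD aI.toNat []).length := by omega
        rw [PySem.List.pyGet?_of_nonneg (path.getD aI.toNat []) hb,
          List.getElem?_eq_getElem hlt, List.getD_eq_getElem _ _ hlt]
      set v := (path.getD aI.toNat []).getD bI.toNat 0 with hv
      have hrows' : ∀ i ∈ List.range ((aI - 1).toNat + 1), 0 < i →
          bI - 1 < ((path.getD i []).length : Int) := by
        intro i hi h0
        simp only [List.mem_range] at hi
        have := hrows i (by simp; omega) h0
        omega
      have hrows'' : ∀ i ∈ List.range (aI.toNat + 1), 0 < i →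
          bI - 1 < ((path.getD i []).length : Int) := by
        intro i hi h0
        have := hrows i hi h0; omega
      have hrows3 : ∀ i ∈ List.range ((aI - 1).toNat + 1), 0 < i →
          bI < ((path.getD i []).length : Int) := by
        intro i hi h0
        simp only [List.mem_range] at hi
        exact hrows i (by simp; omega) h0
      simp only [calcSubsequenceIndexA, matchedPairsB,
        if_neg (by omega : ¬ (aI = 0 ∨ bI = 0)),
        if_pos (⟨ha0, hb0⟩ : aI ≠ 0 ∧ bI ≠ 0), hrow, hval]
      by_cases h1 : v = 1
      · simp only [h1, if_true, List.nil_append]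
        rw [matchedPairsB_acc n path (aI - 1) (bI - 1) [(aI - 1, bI - 1)],
          ih path a b (aI - 1) (bI - 1) (by omega) (by omega) (by omega) hrows' (by omega)]
        simp
      · by_cases h2 : v = -1
        · simp only [if_neg h1, h2, if_true]
          exact ih path a b aI (bI - 1) ha (by omega) halen hrows'' (by omega)
        · simp only [if_neg h1, if_neg h2]
          exact ih path a b (aI - 1) bI (by omega) hb (by omega) hrows3 (by omega)

-- ===== VERDICT (by name: the statement is the Claim_ definition above) =====
theorem calcSubsequenceIndex_spec : Claim_equal_calcSubsequenceIndex := by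
  intro path a b aI bI _ hpre
  unfold Spec_calcSubsequenceIndex calcSubsequenceIndex calcSubsequenceIndex_alt
  rcases hpre with h | h | ⟨ha, hb, hlen, hrows⟩
  · simp [calcSubsequenceIndexA, matchedPairsB, h]
  · simp [calcSubsequenceIndexA, matchedPairsB, h]
  · rw [recA_eq_pairs _ path a b aI bI (le_of_lt ha) (le_of_lt hb) hlen hrows (by omega)]
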